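-- pv_equiv track=rewrite | github.com/arek-grows/Challenges | Challenges 261-280/Challenge273.py | character_mapping
-- ===== SOURCE A (Python) =====
-- def character_mapping(string: str) -> list[int]:
--     accounted_for = []
--     end_map = []
--     for s in string:
--         if s not in accounted_for:
--             accounted_for.append(s)
--         end_map.append(accounted_for.index(s))
--     return end_map  # Put your code here!!!
-- ===== SOURCE B (Python) =====
-- def character_mapping(string: str) -> list[int]:
--     # Stateless closed form per position: a character's code equals the number of
--     # distinct characters occurring strictly before its FIRST occurrence.
--     return [len(set(string[:string.index(c)])) for c in string]
-- ===== Notes on version B (the rewrite author's own statement) =====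
-- stated objective: alternative
-- what changed: Replaces A's stateful fused scan (growing seen-list plus repeated .index rescans) by a stateless per-position closed form: code(c) = number of distinct characters in the slice before c's first occurrence, computed with str.index, slicing and set().
import Mathlib
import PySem

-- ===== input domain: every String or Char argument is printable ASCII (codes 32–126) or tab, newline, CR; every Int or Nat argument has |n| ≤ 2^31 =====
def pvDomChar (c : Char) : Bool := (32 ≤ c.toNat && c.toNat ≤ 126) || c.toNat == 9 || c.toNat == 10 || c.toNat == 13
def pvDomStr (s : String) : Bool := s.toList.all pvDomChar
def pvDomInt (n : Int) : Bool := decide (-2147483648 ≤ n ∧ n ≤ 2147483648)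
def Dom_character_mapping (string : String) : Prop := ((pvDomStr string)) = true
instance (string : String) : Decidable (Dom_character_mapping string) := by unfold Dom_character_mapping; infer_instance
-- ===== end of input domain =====

-- B replaces A's stateful fused scan by a stateless per-position closed form:
-- code(c) = number of distinct characters before c's first occurrence (alternative decomposition, not faster).

-- ===== PORT A =====
-- fused loop: keep the list of seen characters, emit accounted_for.index(s) each step
def character_mapping (string : String) : List Int :=
  (string.toList.foldl
    (fun (st : List Char × List Int) s =>
      let accounted_for := if !st.1.contains s then st.1 ++ [s] else st.1
      -- accounted_for.index(s): s was just ensured present, so index? is some; getD 0 is exact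
      (accounted_for, st.2 ++ [(((PySem.List.index? accounted_for s).getD 0 : Nat) : Int)]))
    ([], [])).2

-- ===== PORT B =====
-- len(set(string[:string.index(c)])) per character; string.index(c) on a present single
-- char is PySem.List.index? (always some here, getD 0 exact); the slice string[:j] with
-- nonnegative j is take j (PySem.List.slice_to_natCast); len(set(...)) is (Set.ofList ...).length
def character_mapping_alt (string : String) : List Int :=
  string.toList.map (fun c =>
    ((PySem.Set.ofList
        (string.toList.take ((PySem.List.index? string.toList c).getD 0))).length : Int))

-- ===== PRECONDITION & SPEC =====
def Spec_character_mapping (string : String) (out : List Int) : Prop := out = character_mapping_alt string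
instance (string : String) (out : List Int) : Decidable (Spec_character_mapping string out) := by unfold Spec_character_mapping; infer_instance

-- ===== CLAIM =====
def Claim_equal_character_mapping : Prop := ∀ (string : String), Dom_character_mapping string → Spec_character_mapping string (character_mapping string)

-- ===== LEMMAS AND PROOFS =====

-- A's seen-list step and its fold, named for the proofs
def accStep (a : List Char) (c : Char) : List Char := if !a.contains c then a ++ [c] else a

def accOf (a : List Char) (l : List Char) : List Char := l.foldl accStep a

theorem accStep_of_mem {a : List Char} {c : Char} (h : c ∈ a) : accStep a c = a := by
  simp [accStep, h]

theorem accStep_of_not_mem {a : List Char} {c : Char} (h : c ∉ a) : accStep a c = a ++ [c] := by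
  simp [accStep, h]

theorem accOf_cons (a : List Char) (c : Char) (t : List Char) :
    accOf a (c :: t) = accOf (accStep a c) t := rfl

theorem accOf_append (a : List Char) (u v : List Char) :
    accOf a (u ++ v) = accOf (accOf a u) v := by
  simp [accOf, List.foldl_append]

theorem accOf_eq_ofList (l : List Char) :
    accOf [] l = PySem.Set.ofList l := by
  rw [PySem.Set.ofList_eq_foldl]
  unfold accOf
  congr 1
  funext a c
  by_cases h : c ∈ a
  · simp [accStep, PySem.Set.add, h]
  · simp [accStep, PySem.Set.add, h]

theorem mem_accOf_iff {x : Char} (l a : List Char) :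
    x ∈ accOf a l ↔ x ∈ a ∨ x ∈ l := by
  induction l generalizing a with
  | nil => simp [accOf]
  | cons c t ih =>
    rw [accOf_cons, ih]
    by_cases hc : c ∈ a
    · rw [accStep_of_mem hc]
      constructor
      · rintro (h | h) <;> simp [h]
      · rintro (h | h)
        · exact Or.inl h
        · rcases List.mem_cons.mp h with h | h
          · exact Or.inl (h ▸ hc)
          · exact Or.inr h
    · rw [accStep_of_not_mem hc]
      simp [or_assoc, List.mem_cons]

theorem accOf_extends (l : List Char) (a : List Char) : ∃ r, accOf a l = a ++ r := by
  induction l generalizing a with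
  | nil => exact ⟨[], by simp [accOf]⟩
  | cons c t ih =>
    obtain ⟨r, hr⟩ := ih (accStep a c)
    rw [accOf_cons]
    by_cases hc : c ∈ a
    · exact ⟨r, by rw [hr, accStep_of_mem hc]⟩
    · exact ⟨c :: r, by rw [hr, accStep_of_not_mem hc]; simp⟩

theorem index?_accOf_stable {a : List Char} {c : Char} (l : List Char) (h : c ∈ a) :
    PySem.List.index? (accOf a l) c = PySem.List.index? a c := by
  obtain ⟨r, hr⟩ := accOf_extends l a
  rw [hr, PySem.List.index?_append_of_mem r h]

-- A's fold, characterised: outputs are first-appearance indices in the FINAL seen-list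
theorem foldA_eq (l : List Char) (a : List Char) (o : List Int) :
    (l.foldl
      (fun (st : List Char × List Int) s =>
        let accounted_for := if !st.1.contains s then st.1 ++ [s] else st.1
        (accounted_for, st.2 ++ [(((PySem.List.index? accounted_for s).getD 0 : Nat) : Int)]))
      (a, o)).2
    = o ++ l.map (fun c => (((PySem.List.index? (accOf a l) c).getD 0 : Nat) : Int)) := by
  induction l generalizing a o with
  | nil => simp [accOf]
  | cons c t ih =>
    have hstab : PySem.List.index? (accOf (accStep a c) t) c
        = PySem.List.index? (accStep a c) c := by
      refine index?_accOf_stable t ?_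
      by_cases h : c ∈ a
      · rw [accStep_of_mem h]; exact h
      · rw [accStep_of_not_mem h]; simp
    rw [List.foldl_cons]
    show (List.foldl
      (fun (st : List Char × List Int) s =>
        let accounted_for := if !st.1.contains s then st.1 ++ [s] else st.1
        (accounted_for, st.2 ++ [(((PySem.List.index? accounted_for s).getD 0 : Nat) : Int)]))
      (accStep a c, o ++ [(((PySem.List.index? (accStep a c) c).getD 0 : Nat) : Int)]) t).2
      = o ++ List.map (fun x => (((PySem.List.index? (accOf a (c :: t)) x).getD 0 : Nat) : Int)) (c :: t)
    rw [ih (accStep a c), accOf_cons, List.map_cons]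
    simp only [List.append_assoc, List.singleton_append]
    congr 3
    rw [hstab]

-- the closed form: for c in l, c's first-appearance rank = #distinct chars before c's first occurrence
theorem index?_accOf_closed_form {l : List Char} {c : Char} (hc : c ∈ l) :
    PySem.List.index? (accOf [] l) c
      = some (accOf [] (l.take ((PySem.List.index? l c).getD 0))).length := by
  obtain ⟨j, hj⟩ := Option.isSome_iff_exists.mp ((PySem.List.index?_isSome_iff _ _).mpr hc)
  obtain ⟨pre, suf, hsplit, hlen, hnotmem⟩ := (PySem.List.index?_eq_some_iff _ _ _).mp hj
  have htake : l.take j = pre := by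
    rw [hsplit, ← hlen, List.take_left]
  have hcacc : c ∉ accOf [] pre := fun h => by
    rcases (mem_accOf_iff pre []).mp h with h | h
    · simp at h
    · exact hnotmem h
  have hkey : accOf [] l = accOf (accOf [] pre ++ [c]) suf := by
    rw [hsplit, show pre ++ c :: suf = (pre ++ [c]) ++ suf by simp,
      accOf_append, accOf_append]
    congr 1
    show accStep (accOf [] pre) c = _
    exact accStep_of_not_mem hcacc
  rw [hkey, index?_accOf_stable suf (by simp),
    PySem.List.index?_append_singleton_self _ _ hcacc, hj]
  simp only [Option.getD_some]
  rw [htake]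

-- ===== VERDICT =====
theorem character_mapping_spec : Claim_equal_character_mapping := by
  intro string _
  unfold Spec_character_mapping character_mapping character_mapping_alt
  rw [foldA_eq string.toList [] []]
  simp only [List.nil_append]
  refine List.map_congr_left (fun c hc => ?_)
  rw [index?_accOf_closed_form hc, accOf_eq_ofList]
  simp
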